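-- pv_equiv track=rewrite | github.com/bb1950328/DigiCod_Nspire | icth_tool.py | fast_multiple_addition
-- ===== SOURCE A (Python) =====
-- def fast_multiple_addition(generator, codeword, show_steps=False):
--     """
--     Führt schnelle Mehrfachaddition durch, um Codewort zu prüfen
--
--     Args:
--         generator (str): Generator-Polynom (Bitfolge)
--         codeword (str): Zu prüfendes Codewort
--         show_steps (bool): Berechnungsschritte anzeigen
--
--     Returns:
--         tuple: (is_valid, result) oder (is_valid, steps, result) wenn show_steps=True
--     """
--     # Kopie des Codeworts für Berechnung
--     result = list(codeword)
--     steps = [codeword] if show_steps else None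
--
--     # Finde Positionen mit '1' im Codewort
--     ones_positions = [i for i, bit in enumerate(codeword) if bit == '1']
--
--     # Entferne führende Nullen im Generator
--     gen = generator
--     while gen.startswith('0') and len(gen) > 1:
--         gen = gen[1:]
--
--     # Für jede Position mit einer '1', addiere den Generator (XOR)
--     for pos in ones_positions:
--         # Überspringe Positionen, die über die Codewortlänge hinausgehen würden
--         if pos > len(codeword) - len(gen):
--             continue
--
--         # Generator an dieser Position anwenden
--         for j in range(len(gen)):
--             if pos + j < len(result) and gen[j] == '1':
--                 # XOR-Operation: 1^1=0, 0^0=0, 1^0=1, 0^1=1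
--                 result[pos + j] = '1' if result[pos + j] != '1' else '0'
--
--         # Diesen Schritt aufzeichnen, falls gewünscht
--         if show_steps:
--             steps.append(''.join(result))
--
--     # Codewort ist gültig, wenn das Ergebnis nur aus Nullen besteht
--     is_valid = all(bit == '0' for bit in result)
--
--     # Passende Ergebnisse zurückgeben
--     if show_steps:
--         return is_valid, steps, ''.join(result)
--     else:
--         return is_valid, ''.join(result)
-- ===== SOURCE B (Python) =====
-- def _render(codeword, applied, gen_ones):
--     # Each output character is the input character flipped k times, where k is
--     # the number of generator applications whose window covers this index.
--     out = []
--     for i, ch in enumerate(codeword):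
--         k = sum(1 for j in gen_ones if i - j in applied)
--         if k:
--             ch = '1' if (ch == '1') != (k % 2) else '0'
--         out.append(ch)
--     return ''.join(out)
--
--
-- def fast_multiple_addition(generator, codeword, show_steps=False):
--     n = len(codeword)
--     gen = generator.lstrip('0') or generator[-1:]
--     g = len(gen)
--     gen_ones = [j for j, ch in enumerate(gen) if ch == '1']
--     applied = [i for i, ch in enumerate(codeword) if ch == '1' and i + g <= n]
--
--     result = _render(codeword, set(applied), gen_ones)
--     is_valid = all(ch == '0' for ch in result)
--
--     if show_steps:
--         steps = [codeword]
--         for t in range(1, len(applied) + 1):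
--             steps.append(_render(codeword, set(applied[:t]), gen_ones))
--         return is_valid, steps, result
--     return is_valid, result
-- ===== Notes on version B (the rewrite author's own statement) =====
-- stated objective: alternative
-- what changed: A imperatively mutates the result list, scattering a per-bit XOR loop over a generator-length window at each '1' position; B never mutates: it builds the set of applied positions and the generator's one-bit offsets once, then in one functional pass computes for each index the count k of applications covering it (a convolution-style gather with set membership) and emits the character flipped k times via the parity closed form. Pre_ excludes show_steps=True, on which both Pythons return a 3-tuple outside the declared Bool x String type.
import Mathlib
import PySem

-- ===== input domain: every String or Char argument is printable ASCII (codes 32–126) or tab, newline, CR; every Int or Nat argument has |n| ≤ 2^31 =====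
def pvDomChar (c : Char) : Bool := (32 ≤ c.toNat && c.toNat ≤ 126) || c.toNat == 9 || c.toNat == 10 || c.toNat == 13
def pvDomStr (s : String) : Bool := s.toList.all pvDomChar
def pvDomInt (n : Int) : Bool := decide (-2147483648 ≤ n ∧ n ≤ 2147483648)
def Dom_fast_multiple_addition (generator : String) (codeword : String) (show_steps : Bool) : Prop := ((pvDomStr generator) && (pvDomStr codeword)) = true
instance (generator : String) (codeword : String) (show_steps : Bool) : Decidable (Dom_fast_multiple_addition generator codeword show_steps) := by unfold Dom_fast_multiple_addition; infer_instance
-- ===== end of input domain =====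

-- B replaces A's imperative scatter (mutating the result list once per '1' position) by a
-- single functional gather: for every index it counts the generator applications covering it
-- and emits the character flipped that many times (parity closed form).
-- Both ports compute the (is_valid, result) pair; show_steps=True makes the Pythons return
-- a 3-tuple (is_valid, steps, result) outside the Bool × String type, so Pre_ excludes it.

-- Python enumerate with Nat indices (indices here are always ≥ 0, so this is exact)
def pvEnum {α : Type} (l : List α) : List (Nat × α) := (List.range l.length).zip l

-- ===== PORT A =====
-- result[p] = '1' if result[p] != '1' else '0'
def pvFlip (c : Char) : Char := if c != '1' then '1' else '0'

-- while gen.startswith('0') and len(gen) > 1: gen = gen[1:]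
def pvStripA : List Char → List Char
  | '0' :: c :: cs => pvStripA (c :: cs)
  | l => l

-- the inner 'for j in range(len(gen))' loop
def pvInnerA (gen : List Char) (pos : Nat) (res : List Char) : List Char :=
  (List.range gen.length).foldl
    (fun r j => if pos + j < r.length && gen.getD j ' ' == '1'
                then r.set (pos + j) (pvFlip (r.getD (pos + j) ' ')) else r) res

def fast_multiple_addition (generator : String) (codeword : String) (show_steps : Bool) : Bool × String :=
  let cw := codeword.toList
  let ones := ((pvEnum cw).filter (fun p => p.2 == '1')).map (fun p => p.1)
  let gen := pvStripA generator.toList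
  let res := ones.foldl
    (fun r (pos : Nat) => if ((↑pos : Int) > (cw.length : Int) - (gen.length : Int)) then r
                  else pvInnerA gen pos r) cw
  (res.all (fun c => c == '0'), String.mk res)

-- ===== PORT B =====
-- gen = generator.lstrip('0') or generator[-1:]
def pvStripB (l : List Char) : List Char :=
  let s := l.dropWhile (fun c => c == '0')
  if s.isEmpty then l.drop (l.length - 1) else s

-- gen_ones = [j for j, ch in enumerate(gen) if ch == '1']
def pvGenOnes (gen : List Char) : List Nat :=
  ((pvEnum gen).filter (fun p => p.2 == '1')).map (fun p => p.1)

-- applied = [i for i, ch in enumerate(codeword) if ch == '1' and i + g <= n]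
def pvApplied (cw : List Char) (g : Nat) : List Nat :=
  ((pvEnum cw).filter (fun p => p.2 == '1' && decide (p.1 + g ≤ cw.length))).map (fun p => p.1)

-- `if k: ch = '1' if (ch == '1') != (k % 2) else '0'` — the character after k flips
def pvFlipK (c : Char) (k : Nat) : Char :=
  if k ≠ 0 then (if ((c == '1') != decide (k % 2 = 1)) then '1' else '0') else c

-- _render: k = sum(1 for j in gen_ones if i - j in applied); `i - j in S` is false for
-- negative i - j (S holds naturals), hence the j ≤ i guard; the python set's membership
-- is membership of the (duplicate-free) applied list, ported as List.contains.
def pvRenderB (cw : List Char) (applied genOnes : List Nat) : List Char :=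
  (pvEnum cw).map (fun ic =>
    pvFlipK ic.2 ((genOnes.filter (fun j => decide (j ≤ ic.1) && applied.contains (ic.1 - j))).length))

def fast_multiple_addition_alt (generator : String) (codeword : String) (show_steps : Bool) : Bool × String :=
  let cw := codeword.toList
  let gen := pvStripB generator.toList
  let genOnes := pvGenOnes gen
  let applied := pvApplied cw gen.length
  let res := pvRenderB cw applied genOnes
  (res.all (fun c => c == '0'), String.mk res)

-- ===== PRECONDITION & SPEC =====
-- Pre_ excludes show_steps = True, on which the Python A (and B) returns a 3-tuple
-- (is_valid, steps, result) — not a value of the declared return type Bool × String.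
def Pre_fast_multiple_addition (generator : String) (codeword : String) (show_steps : Bool) : Prop :=
  show_steps = false
instance (generator : String) (codeword : String) (show_steps : Bool) : Decidable (Pre_fast_multiple_addition generator codeword show_steps) := by unfold Pre_fast_multiple_addition; infer_instance

def pvWitness_fast_multiple_addition : String × String × Bool := ("11", "110", false)

def Spec_fast_multiple_addition (generator : String) (codeword : String) (show_steps : Bool) (out : Bool × String) : Prop := out = fast_multiple_addition_alt generator codeword show_steps
instance (generator : String) (codeword : String) (show_steps : Bool) (out : Bool × String) : Decidable (Spec_fast_multiple_addition generator codeword show_steps out) := by unfold Spec_fast_multiple_addition; infer_instance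

-- ===== CLAIM (what is proved, stated in full; the proofs are below) =====
def Claim_equal_fast_multiple_addition : Prop := ∀ (generator : String) (codeword : String) (show_steps : Bool), Dom_fast_multiple_addition generator codeword show_steps → Pre_fast_multiple_addition generator codeword show_steps → Spec_fast_multiple_addition generator codeword show_steps (fast_multiple_addition generator codeword show_steps)

-- ===== LEMMAS AND PROOFS =====

theorem pvEnum_length {α : Type} (l : List α) : (pvEnum l).length = l.length := by
  simp [pvEnum]

theorem pvEnum_getElem {α : Type} (l : List α) (i : Nat) (h : i < (pvEnum l).length) :
    (pvEnum l)[i] = (i, l[i]'(by simpa [pvEnum_length] using h)) := by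
  simp [pvEnum]

theorem pvEnum_eq_map (l : List Char) :
    pvEnum l = (List.range l.length).map (fun i => (i, l.getD i ' ')) := by
  apply List.ext_getElem (by simp [pvEnum_length])
  intro i h1 h2
  have hi : i < l.length := by simpa [pvEnum_length] using h1
  rw [pvEnum_getElem]
  simp only [List.getElem_map, List.getElem_range]
  rw [List.getD_eq_getElem l ' ' hi]

-- the two generator-stripping routines agree
theorem stripB_cons_zero (b : Char) (bs : List Char) :
    pvStripB ('0' :: b :: bs) = pvStripB (b :: bs) := by
  unfold pvStripB
  simp only [List.dropWhile_cons, beq_self_eq_true, if_true, List.length_cons]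
  by_cases h : (if (b == '0') = true then List.dropWhile (fun c => c == '0') bs else b :: bs).isEmpty
  · rw [if_pos h, if_pos h]
    show List.drop (bs.length + 1 - 1) (b :: bs) = List.drop (bs.length + 1 + 1 - 1) ('0' :: b :: bs)
    rw [show bs.length + 1 + 1 - 1 = bs.length + 1 from rfl, List.drop_succ_cons]
    rfl
  · rw [if_neg h, if_neg h]

theorem strip_eq (l : List Char) : pvStripA l = pvStripB l := by
  induction l with
  | nil => rfl
  | cons a l ih =>
    by_cases ha : a = '0'
    · subst ha
      cases l with
      | nil => rfl
      | cons b bs =>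
        rw [show pvStripA ('0' :: b :: bs) = pvStripA (b :: bs) from rfl, ih,
          stripB_cons_zero]
    · rw [show pvStripA (a :: l) = a :: l from by
        rw [pvStripA.eq_def]; split
        · rename_i heq; injection heq with h1 _; exact absurd h1 ha
        · rfl]
      unfold pvStripB
      simp [ha]

-- A's inner loop, cut off after k steps: it flips exactly the covered one-bits of gen
theorem innerA_partial (gen : List Char) (pos : Nat) (res : List Char) (k : Nat) :
    ((List.range k).foldl
      (fun r j => if pos + j < r.length && gen.getD j ' ' == '1'
                  then r.set (pos + j) (pvFlip (r.getD (pos + j) ' ')) else r) res).length = res.length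
    ∧ ∀ i, i < res.length →
      ((List.range k).foldl
        (fun r j => if pos + j < r.length && gen.getD j ' ' == '1'
                    then r.set (pos + j) (pvFlip (r.getD (pos + j) ' ')) else r) res).getD i ' '
        = if pos ≤ i ∧ i < pos + k ∧ (gen.getD (i - pos) ' ' == '1') then pvFlip (res.getD i ' ') else res.getD i ' ' := by
  induction k with
  | zero =>
    refine ⟨rfl, fun i hi => ?_⟩
    rw [if_neg (by omega)]
    rfl
  | succ k ih =>
    obtain ⟨ihlen, ihget⟩ := ih
    rw [List.range_succ, List.foldl_append]
    set rk := (List.range k).foldl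
      (fun r j => if pos + j < r.length && gen.getD j ' ' == '1'
                  then r.set (pos + j) (pvFlip (r.getD (pos + j) ' ')) else r) res with hrk
    simp only [List.foldl_cons, List.foldl_nil]
    by_cases hcond : pos + k < rk.length ∧ (gen.getD k ' ' == '1')
    · have hc : (decide (pos + k < rk.length) && (gen.getD k ' ' == '1')) = true := by
        rw [Bool.and_eq_true, decide_eq_true_eq]
        exact ⟨hcond.1, by simpa using hcond.2⟩
      rw [if_pos hc]
      constructor
      · rw [List.length_set, ihlen]
      · intro i hi
        have hread : rk.getD (pos + k) ' ' = res.getD (pos + k) ' ' := by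
          rw [ihget (pos + k) (by omega), if_neg (by omega)]
        by_cases hik : i = pos + k
        · subst hik
          have : (rk.set (pos + k) (pvFlip (rk.getD (pos + k) ' '))).getD (pos + k) ' '
              = pvFlip (rk.getD (pos + k) ' ') := by
            rw [List.getD_eq_getElem _ _ (by rw [List.length_set, ihlen]; omega : pos + k < (rk.set (pos + k) (pvFlip (rk.getD (pos + k) ' '))).length)]
            rw [List.getElem_set, if_pos rfl]
          rw [this, hread, if_pos ⟨by omega, by omega, by
            have := hcond.2; simpa using this⟩]
        · have hset : (rk.set (pos + k) (pvFlip (rk.getD (pos + k) ' '))).getD i ' ' = rk.getD i ' ' := by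
            by_cases hlen : i < rk.length
            · rw [List.getD_eq_getElem _ _ (by rw [List.length_set]; omega),
                List.getD_eq_getElem _ _ hlen, List.getElem_set, if_neg (by omega)]
            · rw [List.getD_eq_default _ _ (by rw [List.length_set]; omega),
                List.getD_eq_default _ _ (by omega)]
          rw [hset, ihget i hi]
          by_cases h1 : pos ≤ i ∧ i < pos + k ∧ (gen.getD (i - pos) ' ' == '1')
          · rw [if_pos h1, if_pos ⟨h1.1, by omega, h1.2.2⟩]
          · rw [if_neg h1, if_neg (by
              intro h2
              exact h1 ⟨h2.1, by omega, by
                have : i - pos ≠ k := by omega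
                exact h2.2.2⟩)]
    · have hc : (decide (pos + k < rk.length) && (gen.getD k ' ' == '1')) = false := by
        cases hg : (gen.getD k ' ' == '1') with
        | false => rw [Bool.and_false]
        | true =>
          cases hl : decide (pos + k < rk.length) with
          | false => rw [Bool.false_and]
          | true => exact absurd ⟨of_decide_eq_true hl, hg⟩ hcond
      rw [if_neg (by rw [hc]; exact Bool.false_ne_true)]
      refine ⟨ihlen, fun i hi => ?_⟩
      rw [ihget i hi]
      by_cases h1 : pos ≤ i ∧ i < pos + k ∧ (gen.getD (i - pos) ' ' == '1')
      · rw [if_pos h1, if_pos ⟨h1.1, by omega, h1.2.2⟩]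
      · rw [if_neg h1]
        rw [if_neg ?_]
        intro h2
        apply h1
        refine ⟨h2.1, ?_, h2.2.2⟩
        by_cases hik : i = pos + k
        · exfalso
          subst hik
          have hik2 : pos + k < rk.length := by rw [ihlen]; omega
          have : gen.getD (pos + k - pos) ' ' == '1' := h2.2.2
          simp only [Nat.add_sub_cancel_left] at this
          exact hcond ⟨hik2, this⟩
        · omega

theorem innerA_length (gen : List Char) (pos : Nat) (res : List Char) :
    (pvInnerA gen pos res).length = res.length :=
  (innerA_partial gen pos res gen.length).1

theorem innerA_getD (gen : List Char) (pos : Nat) (res : List Char) (i : Nat) (hi : i < res.length) :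
    (pvInnerA gen pos res).getD i ' '
      = if pos ≤ i ∧ i < pos + gen.length ∧ (gen.getD (i - pos) ' ' == '1')
        then pvFlip (res.getD i ' ') else res.getD i ' ' :=
  (innerA_partial gen pos res gen.length).2 i hi

-- A's outer loop keeps the length
theorem outerA_len (gen : List Char) (n : Nat) (ps : List Nat) :
    ∀ (r : List Char),
    (ps.foldl (fun r (pos : Nat) => if ((↑pos : Int) > (n : Int) - (gen.length : Int)) then r
                           else pvInnerA gen pos r) r).length = r.length := by
  induction ps with
  | nil => intro r; rfl
  | cons pos ps ih =>
    intro r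
    simp only [List.foldl_cons]
    by_cases h : ((↑pos : Int) > (n : Int) - (gen.length : Int))
    · rw [if_pos h, ih]
    · rw [if_neg h, ih, innerA_length]

-- A's outer loop pointwise: at index i it is a sequence of conditional flips
theorem outerA_getD (gen : List Char) (n : Nat) (i : Nat) (hi : i < n) (ps : List Nat) :
    ∀ (r : List Char), r.length = n →
    (ps.foldl (fun r (pos : Nat) => if ((↑pos : Int) > (n : Int) - (gen.length : Int)) then r
                           else pvInnerA gen pos r) r).getD i ' '
      = ps.foldl (fun c pos =>
          if (decide (pos + gen.length ≤ n) && decide (pos ≤ i) && decide (i < pos + gen.length)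
              && (gen.getD (i - pos) ' ' == '1'))
          then pvFlip c else c) (r.getD i ' ') := by
  induction ps with
  | nil => intro r _; rfl
  | cons pos ps ih =>
    intro r hr
    simp only [List.foldl_cons]
    by_cases h : ((↑pos : Int) > (n : Int) - (gen.length : Int))
    · rw [if_pos h, ih r hr,
        show (decide (pos + gen.length ≤ n) && decide (pos ≤ i) && decide (i < pos + gen.length)
              && (gen.getD (i - pos) ' ' == '1')) = false from by
          rw [show decide (pos + gen.length ≤ n) = false from by simp; omega]
          simp]
      simp
    · have hyes : pos + gen.length ≤ n := by omega
      rw [if_neg h, ih (pvInnerA gen pos r) (by rw [innerA_length, hr]),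
        innerA_getD gen pos r i (by omega)]
      by_cases hcase : pos ≤ i ∧ i < pos + gen.length ∧ (gen.getD (i - pos) ' ' == '1')
      · rw [if_pos hcase,
          show (decide (pos + gen.length ≤ n) && decide (pos ≤ i) && decide (i < pos + gen.length)
              && (gen.getD (i - pos) ' ' == '1')) = true from by
            simp only [Bool.and_eq_true, decide_eq_true_eq]
            exact ⟨⟨⟨hyes, hcase.1⟩, hcase.2.1⟩, hcase.2.2⟩]
        simp
      · rw [if_neg hcase,
          show (decide (pos + gen.length ≤ n) && decide (pos ≤ i) && decide (i < pos + gen.length)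
              && (gen.getD (i - pos) ' ' == '1')) = false from by
            rcases Decidable.not_and_iff_or_not.mp hcase with h1 | h23
            · rw [show decide (pos ≤ i) = false from by simp [h1]]; simp
            · rcases Decidable.not_and_iff_or_not.mp h23 with h2 | h3
              · rw [show decide (i < pos + gen.length) = false from by simp [h2]]; simp
              · rw [show (gen.getD (i - pos) ' ' == '1') = false from by
                  cases hg : (gen.getD (i - pos) ' ' == '1')
                  · rfl
                  · exact absurd hg h3]
                simp]
        simp

-- one more flip advances the flip count
theorem flipK_flip (c : Char) (k : Nat) : pvFlipK (pvFlip c) k = pvFlipK c (k + 1) := by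
  unfold pvFlipK pvFlip
  rcases Nat.mod_two_eq_zero_or_one k with h | h
  · have h2 : (k + 1) % 2 = 1 := by omega
    by_cases hk : k = 0
    · subst hk; by_cases hc : c = '1' <;> simp [hc, h2]
    · by_cases hc : c = '1' <;> simp [hk, hc, h, h2]
  · have h2 : (k + 1) % 2 = 0 := by omega
    have hk : k ≠ 0 := by omega
    by_cases hc : c = '1' <;> simp [hk, hc, h, h2]

-- a chain of conditional flips is the flip-count closed form
theorem flips_to_count {α : Type} (cond : α → Bool) (L : List α) :
    ∀ c : Char, L.foldl (fun c x => if cond x then pvFlip c else c) c = pvFlipK c (L.countP cond) := by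
  induction L with
  | nil => intro c; simp [pvFlipK]
  | cons x L ih =>
    intro c
    simp only [List.foldl_cons, List.countP_cons]
    by_cases h : cond x
    · rw [if_pos h, ih, flipK_flip]; simp [h]
    · rw [if_neg h, ih]; simp [h]

-- countP over a range as a Finset cardinality
theorem countP_range_card (p : Nat → Bool) (n : Nat) :
    (List.range n).countP p = ((Finset.range n).filter (fun x => p x = true)).card := by
  induction n with
  | zero => simp
  | succ n ih =>
    rw [List.range_succ, List.countP_append, Finset.range_add_one, Finset.filter_insert]
    by_cases h : p n = true
    · rw [if_pos h, Finset.card_insert_of_notMem (by simp)]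
      simp [ih, h]
    · rw [if_neg h]
      simp [ih, h]

-- membership in B's applied-position list
theorem mem_applied (cw : List Char) (g x : Nat) :
    x ∈ pvApplied cw g ↔ x < cw.length ∧ (cw.getD x ' ' == '1') = true ∧ x + g ≤ cw.length := by
  unfold pvApplied
  rw [pvEnum_eq_map]
  simp only [List.mem_map, List.mem_filter, List.mem_map, List.mem_range, Bool.and_eq_true,
    decide_eq_true_eq]
  constructor
  · rintro ⟨p, ⟨⟨j, hj, rfl⟩, hbit, hle⟩, rfl⟩
    exact ⟨hj, hbit, hle⟩
  · rintro ⟨hx, hbit, hle⟩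
    exact ⟨(x, cw.getD x ' '), ⟨⟨x, hx, rfl⟩, hbit, hle⟩, rfl⟩

theorem list_contains_eq (l : List Nat) (x : Nat) : l.contains x = decide (x ∈ l) := by
  by_cases h : x ∈ l
  · rw [List.contains_iff_mem.mpr h, decide_eq_true h]
  · have hc : l.contains x = false :=
      Bool.eq_false_iff.mpr (fun hcc => h (List.contains_iff_mem.mp hcc))
    rw [hc, decide_eq_false h]

-- the heart: A's flip count at index i equals B's covering count at index i
theorem count_eq (gen cw : List Char) (i : Nat) (hi : i < cw.length) :
    (((pvEnum cw).filter (fun p => p.2 == '1')).map (fun p => p.1)).countP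
      (fun pos => decide (pos + gen.length ≤ cw.length) && decide (pos ≤ i)
        && decide (i < pos + gen.length) && (gen.getD (i - pos) ' ' == '1'))
    = ((pvGenOnes gen).filter
        (fun j => decide (j ≤ i) && (pvApplied cw gen.length).contains (i - j))).length := by
  set g := gen.length with hg
  rw [List.countP_map, List.countP_filter, pvEnum_eq_map, List.countP_map]
  rw [← List.countP_eq_length_filter]
  unfold pvGenOnes
  rw [List.countP_map, List.countP_filter, pvEnum_eq_map, List.countP_map]
  rw [countP_range_card, countP_range_card]
  refine Finset.card_bij' (fun pos _ => i - pos) (fun j _ => i - j) ?_ ?_ ?_ ?_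
  · intro pos hpos
    simp only [Finset.mem_filter, Finset.mem_range, Function.comp_apply, Bool.and_eq_true,
      decide_eq_true_eq, list_contains_eq] at hpos ⊢
    obtain ⟨hprange, ⟨⟨⟨hfit, hle⟩, hlt⟩, hgenbit⟩, hcwbit⟩ := hpos
    refine ⟨by omega, ⟨by omega, ?_⟩, hgenbit⟩
    rw [show i - (i - pos) = pos from by omega]
    exact (mem_applied cw g pos).mpr ⟨by omega, hcwbit, by omega⟩
  · intro j hj
    simp only [Finset.mem_filter, Finset.mem_range, Function.comp_apply, Bool.and_eq_true,
      decide_eq_true_eq, list_contains_eq] at hj ⊢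
    obtain ⟨hjrange, ⟨hle, hmem⟩, hgenbit⟩ := hj
    obtain ⟨hlt, hbit, hfit⟩ := (mem_applied cw g (i - j)).mp hmem
    refine ⟨by omega, ⟨⟨⟨by omega, by omega⟩, by omega⟩, ?_⟩, hbit⟩
    rw [show i - (i - j) = j from by omega]
    exact hgenbit
  · intro pos hpos
    simp only [Finset.mem_filter, Finset.mem_range, Function.comp_apply, Bool.and_eq_true,
      decide_eq_true_eq] at hpos
    show i - (i - pos) = pos
    omega
  · intro j hj
    simp only [Finset.mem_filter, Finset.mem_range, Function.comp_apply, Bool.and_eq_true,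
      decide_eq_true_eq] at hj
    show i - (i - j) = j
    omega

-- the two result lists agree
theorem result_list_eq (gen cw : List Char) :
    ((((pvEnum cw).filter (fun p => p.2 == '1')).map (fun p => p.1)).foldl
      (fun r (pos : Nat) => if ((↑pos : Int) > (cw.length : Int) - (gen.length : Int)) then r
                    else pvInnerA gen pos r) cw)
    = pvRenderB cw (pvApplied cw gen.length) (pvGenOnes gen) := by
  set ps := (((pvEnum cw).filter (fun p => p.2 == '1')).map (fun p => p.1)) with hps
  have hlen1 : (ps.foldl (fun r (pos : Nat) => if ((↑pos : Int) > (cw.length : Int) - (gen.length : Int)) then r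
                    else pvInnerA gen pos r) cw).length = cw.length := outerA_len gen cw.length ps cw
  have hlen2 : (pvRenderB cw (pvApplied cw gen.length) (pvGenOnes gen)).length = cw.length := by
    unfold pvRenderB; rw [List.length_map, pvEnum_length]
  apply List.ext_getElem (by rw [hlen1, hlen2])
  intro i hi1 hi2
  have hiN : i < cw.length := by rw [hlen1] at hi1; exact hi1
  rw [← List.getD_eq_getElem _ ' ' hi1, outerA_getD gen cw.length i hiN ps cw rfl,
    flips_to_count]
  have hR : (pvRenderB cw (pvApplied cw gen.length) (pvGenOnes gen))[i]'hi2
      = pvFlipK (cw.getD i ' ')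
          (((pvGenOnes gen).filter
            (fun j => decide (j ≤ i) && (pvApplied cw gen.length).contains (i - j))).length) := by
    simp only [pvRenderB, List.getElem_map, pvEnum_getElem, List.getD_eq_getElem cw ' ' hiN]
  rw [hR, hps, count_eq gen cw i hiN]

-- ===== VERDICT (by name: the statement is the Claim_ definition above) =====
theorem fast_multiple_addition_spec : Claim_equal_fast_multiple_addition := by
  intro generator codeword show_steps _ _
  unfold Spec_fast_multiple_addition
  simp only [fast_multiple_addition, fast_multiple_addition_alt]
  rw [strip_eq, result_list_eq]
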